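-- pv_equiv track=rewrite | github.com/brynja-schultz/NYU-CSCI-UA-469-Natural-Language-Processing | Assignment 5 - Sequence Labeling (Noun Group)/final_features.py | pos_tags_after_last_dt
-- ===== SOURCE A (Python) =====
-- def pos_tags_after_last_dt(sentence, index):
--     POS_tags = set()
--     for word_POS in sentence[:index]:
--         _, POS = word_POS.split()
--         if POS == 'DT':
--             POS_tags = set()
--         else:
--             POS_tags.add(POS)
--     return '+'.join(sorted(POS_tags))
-- ===== SOURCE B (Python) =====
-- def pos_tags_after_last_dt(sentence, index):
--     # parse every word first (so malformed words still raise), then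
--     # locate the last 'DT' and dedupe-sort the tags strictly after it
--     tags = [POS for _, POS in (word_POS.split() for word_POS in sentence[:index])]
--     last_dt = -1
--     for i, t in enumerate(tags):
--         if t == 'DT':
--             last_dt = i
--     return '+'.join(sorted(set(tags[last_dt + 1:])))
-- ===== Notes on version B (the rewrite author's own statement) =====
-- stated objective: alternative
-- what changed: A's single reset-on-DT pass with a mutable set is replaced by parse-all, find-last-DT-index, slice-after, dedupe-sort.
import Mathlib
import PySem

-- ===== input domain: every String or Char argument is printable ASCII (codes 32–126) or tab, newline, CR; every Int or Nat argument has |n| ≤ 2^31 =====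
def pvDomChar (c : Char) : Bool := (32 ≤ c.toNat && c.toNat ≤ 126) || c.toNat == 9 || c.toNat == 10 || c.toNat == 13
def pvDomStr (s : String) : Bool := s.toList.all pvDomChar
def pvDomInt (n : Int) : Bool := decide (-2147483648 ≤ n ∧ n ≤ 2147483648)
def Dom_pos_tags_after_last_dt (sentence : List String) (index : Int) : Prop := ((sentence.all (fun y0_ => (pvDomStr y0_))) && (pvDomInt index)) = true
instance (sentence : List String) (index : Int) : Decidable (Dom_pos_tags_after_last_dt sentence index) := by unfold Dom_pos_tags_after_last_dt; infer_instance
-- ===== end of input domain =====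

-- B reshapes A's reset-on-DT single pass into parse-all / find-last-DT / slice-after / dedupe-sort (alternative decomposition, same cost).


-- ===== PORT A =====
-- the `| _ =>` branch is Python's ValueError on unpacking; Pre_ excludes those inputs
def pos_tags_after_last_dt (sentence : List String) (index : Int) : String :=
  let POS_tags : PySem.Set String :=
    (PySem.List.slice sentence none (some index)).foldl
      (fun POS_tags word_POS =>
        match PySem.Str.split₀ word_POS with
        | [_, POS] => if POS == "DT" then PySem.Set.empty else PySem.Set.add POS_tags POS
        | _ => POS_tags)
      PySem.Set.empty
  PySem.Str.join "+" (PySem.List.sorted POS_tags (fun x => x) false)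

-- ===== PORT B =====
-- `_, POS = word_POS.split()`; the `""` branch is Python's ValueError on unpacking, Pre_ excludes it
def pvParse (word_POS : String) : String :=
  (PySem.Str.split₀ word_POS).getD 1 ""

def pos_tags_after_last_dt_alt (sentence : List String) (index : Int) : String :=
  let tags : List String :=
    (PySem.List.slice sentence none (some index)).map pvParse
  let last_dt : Int :=
    (PySem.List.enumerate tags).foldl
      (fun last_dt it => if it.2 == "DT" then it.1 else last_dt) (-1)
  PySem.Str.join "+"
    (PySem.List.sorted
      (PySem.Set.ofList (PySem.List.slice tags (some (last_dt + 1)) none))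
      (fun x => x) false)

-- ===== PRECONDITION & SPEC =====
-- Pre_ excludes exactly the inputs where A raises ValueError: some word in sentence[:index]
-- whose whitespace split does not have exactly two fields (B raises there too).
def Pre_pos_tags_after_last_dt (sentence : List String) (index : Int) : Prop :=
  ∀ w ∈ PySem.List.slice sentence none (some index), (PySem.Str.split₀ w).length = 2
instance (sentence : List String) (index : Int) : Decidable (Pre_pos_tags_after_last_dt sentence index) := by unfold Pre_pos_tags_after_last_dt; infer_instance
def pvWitness_pos_tags_after_last_dt : List String × Int := (["the DT", "big JJ", "dog NN"], 3)

def Spec_pos_tags_after_last_dt (sentence : List String) (index : Int) (out : String) : Prop := out = pos_tags_after_last_dt_alt sentence index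
instance (sentence : List String) (index : Int) (out : String) : Decidable (Spec_pos_tags_after_last_dt sentence index out) := by unfold Spec_pos_tags_after_last_dt; infer_instance

-- ===== CLAIM (what is proved, stated in full; the proofs are below) =====
def Claim_equal_pos_tags_after_last_dt : Prop := ∀ (sentence : List String) (index : Int), Dom_pos_tags_after_last_dt sentence index → Pre_pos_tags_after_last_dt sentence index → Spec_pos_tags_after_last_dt sentence index (pos_tags_after_last_dt sentence index)

-- ===== LEMMAS AND PROOFS =====

def pvStepA (s : PySem.Set String) (t : String) : PySem.Set String :=
  if t == "DT" then PySem.Set.empty else PySem.Set.add s t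

def pvLastDt (ts : List String) : Int :=
  (PySem.List.enumerate ts).foldl
    (fun last_dt it => if it.2 == "DT" then it.1 else last_dt) (-1)

-- A's fold over the raw words equals the tag-wise fold, given every split has two fields
theorem pvFoldA_eq (ws : List String) (h : ∀ w ∈ ws, (PySem.Str.split₀ w).length = 2)
    (s : PySem.Set String) :
    ws.foldl
      (fun POS_tags word_POS =>
        match PySem.Str.split₀ word_POS with
        | [_, POS] => if POS == "DT" then PySem.Set.empty else PySem.Set.add POS_tags POS
        | _ => POS_tags)
      s = (ws.map pvParse).foldl pvStepA s := by
  induction ws generalizing s with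
  | nil => rfl
  | cons w ws ih =>
    have hw : ∃ a b, PySem.Str.split₀ w = [a, b] := by
      have := h w (List.mem_cons_self ..)
      match hsp : PySem.Str.split₀ w with
      | [a, b] => exact ⟨a, b, rfl⟩
      | [] => simp [hsp] at this
      | [a] => simp [hsp] at this
      | a :: b :: c :: r => simp [hsp] at this
    obtain ⟨a, b, hab⟩ := hw
    simp only [List.foldl_cons, List.map_cons, hab, pvParse, pvStepA]
    exact ih (fun x hx => h x (List.mem_cons_of_mem _ hx)) _

theorem pvLastDt_append (ts : List String) (t : String) :
    pvLastDt (ts ++ [t]) = if t == "DT" then (ts.length : Int) else pvLastDt ts := by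
  simp only [pvLastDt, PySem.List.enumerate_append, List.foldl_append,
    PySem.List.enumerate_cons, PySem.List.enumerate_nil, List.foldl_cons, List.foldl_nil]
  split <;> simp

theorem pvLastDt_bounds (ts : List String) :
    -1 ≤ pvLastDt ts ∧ pvLastDt ts < ts.length := by
  induction ts using List.reverseRecOn with
  | nil => exact ⟨le_refl _, by norm_num [pvLastDt, PySem.List.enumerate_nil]⟩
  | append_singleton ts t ih =>
    rw [pvLastDt_append]
    simp only [List.length_append, List.length_cons, List.length_nil]
    split
    · push_cast; omega
    · push_cast; omega

theorem pvMainDrop (ts : List String) :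
    ts.foldl pvStepA PySem.Set.empty =
      PySem.Set.ofList (ts.drop (pvLastDt ts + 1).toNat) := by
  induction ts using List.reverseRecOn with
  | nil => rfl
  | append_singleton ts t ih =>
    rw [List.foldl_append, List.foldl_cons, List.foldl_nil, pvLastDt_append]
    by_cases hdt : t == "DT"
    · simp only [hdt, if_true, pvStepA]
      have : ((ts.length : Int) + 1).toNat = ts.length + 1 := by omega
      rw [this, List.drop_eq_nil_of_le (by simp), PySem.Set.ofList_nil]
      rfl
    · have hb := pvLastDt_bounds ts
      have hle : (pvLastDt ts + 1).toNat ≤ ts.length := by omega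
      simp only [hdt, Bool.false_eq_true, if_false, pvStepA]
      rw [List.drop_append_of_le_length hle, PySem.Set.ofList_append_singleton, ih]

-- the reset-on-DT fold over tags is set(tags after the last DT)
theorem pvMain (ts : List String) :
    ts.foldl pvStepA PySem.Set.empty =
      PySem.Set.ofList (PySem.List.slice ts (some (pvLastDt ts + 1)) none) := by
  rw [PySem.List.slice_from ts (by have := pvLastDt_bounds ts; omega)]
  exact pvMainDrop ts

-- ===== VERDICT (by name: the statement is the Claim_ definition above) =====
theorem pos_tags_after_last_dt_spec : Claim_equal_pos_tags_after_last_dt := by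
  intro sentence index _ hpre
  unfold Spec_pos_tags_after_last_dt pos_tags_after_last_dt pos_tags_after_last_dt_alt
  simp only [pvFoldA_eq _ hpre, pvMain, pvLastDt]
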